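-- pv_equiv track=rewrite | github.com/nick-ivanov/nnlogic | nnlogic.py | bindigit
-- ===== SOURCE A (Python) =====
-- def bindigit(n,p, bits):
-- 	""" Returns binary digit of number n in position p """
-- 	cp = 0 	# Current position
-- 	real_p = bits - p - 1
-- 	while(cp < 27):		# Assume our number is less than 27 bits
-- 		if cp == real_p:
-- 			return n%2 	# Return remainder of division on 2 at current position
-- 		n = n // 2 		# Integer division
-- 		cp = cp + 1
--
-- 	return -1
-- ===== SOURCE B (Python) =====
-- def bindigit(n, p, bits):
--     """ Returns binary digit of number n in position p """
--     real_p = bits - p - 1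
--     if 0 <= real_p < 27:
--         return (n >> real_p) % 2
--     return -1
-- ===== Notes on version B (the rewrite author's own statement) =====
-- stated objective: simpler
-- what changed: Replaces the fixed 27-iteration divide-by-2-and-compare loop with a direct bounds check on real_p = bits - p - 1 followed by a single arithmetic right shift and parity test.
import Mathlib
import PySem

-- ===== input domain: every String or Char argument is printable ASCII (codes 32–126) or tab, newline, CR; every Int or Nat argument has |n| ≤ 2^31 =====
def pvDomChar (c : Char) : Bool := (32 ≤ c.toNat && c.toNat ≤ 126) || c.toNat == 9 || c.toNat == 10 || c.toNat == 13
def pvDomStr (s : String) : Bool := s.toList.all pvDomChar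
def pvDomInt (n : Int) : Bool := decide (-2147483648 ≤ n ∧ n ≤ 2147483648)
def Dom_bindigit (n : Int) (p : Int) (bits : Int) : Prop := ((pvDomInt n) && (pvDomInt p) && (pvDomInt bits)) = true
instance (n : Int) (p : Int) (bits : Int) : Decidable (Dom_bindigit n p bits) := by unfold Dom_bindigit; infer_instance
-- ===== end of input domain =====

-- B replaces A's fixed 27-iteration divide-by-2 loop with a bounds check and a single shift (objective: simpler).

-- ===== PORT A =====
-- 'while cp < 27' with cp starting at 0 and increasing by 1 each pass: exactly 27 - cp
-- remaining iterations, modelled by the fuel argument (fuel = 27 at the call, cp = 0).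
def bindigitLoop (n : Int) (cp : Int) (real_p : Int) (fuel : Nat) : Int :=
  match fuel with
  | 0 => -1                                    -- loop exhausted: return -1
  | f + 1 =>
    if cp = real_p then PySem.Int.mod n 2      -- return n % 2
    else bindigitLoop (PySem.Int.floordiv n 2) (cp + 1) real_p f   -- n = n // 2; cp = cp + 1

def bindigit (n : Int) (p : Int) (bits : Int) : Int :=
  bindigitLoop n 0 (bits - p - 1) 27

-- ===== PORT B =====
-- Source B: real_p = bits - p - 1; if 0 <= real_p < 27: return (n >> real_p) % 2; return -1
-- Python's '>>' on int is core Lean's '>>>' (arithmetic/floor shift, exact also on negatives);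
-- '% 2' with positive modulus is Lean's '% 2' on Int.
def bindigit_alt (n : Int) (p : Int) (bits : Int) : Int :=
  let real_p := bits - p - 1
  if 0 ≤ real_p ∧ real_p < 27 then (n >>> real_p.toNat) % 2 else -1

-- ===== PRECONDITION & SPEC =====
def Spec_bindigit (n : Int) (p : Int) (bits : Int) (out : Int) : Prop := out = bindigit_alt n p bits
instance (n : Int) (p : Int) (bits : Int) (out : Int) : Decidable (Spec_bindigit n p bits out) := by unfold Spec_bindigit; infer_instance

-- ===== CLAIM (what is proved, stated in full; the proofs are below) =====
def Claim_equal_bindigit : Prop := ∀ (n : Int) (p : Int) (bits : Int), Dom_bindigit n p bits → Spec_bindigit n p bits (bindigit n p bits)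

-- ===== LEMMAS AND PROOFS =====

theorem shift_step (n : Int) (k : Nat) : n >>> (k + 1) = (PySem.Int.floordiv n 2) >>> k := by
  rw [Int.shiftRight_eq_div_pow, Int.shiftRight_eq_div_pow,
      PySem.Int.floordiv_eq_ediv_of_pos (by norm_num)]
  push_cast
  rw [Int.ediv_ediv_of_nonneg (by norm_num), pow_succ, mul_comm]

theorem bindigitLoop_hit (fuel : Nat) : ∀ (n cp rp : Int), cp ≤ rp → rp < cp + fuel →
    bindigitLoop n cp rp fuel = (n >>> (rp - cp).toNat) % 2 := by
  induction fuel with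
  | zero => intro n cp rp h1 h2; omega
  | succ f ih =>
    intro n cp rp h1 h2
    by_cases h : cp = rp
    · subst h
      simp [bindigitLoop]
    · have hlt : cp + 1 ≤ rp := by omega
      have hk : (rp - cp).toNat = (rp - (cp + 1)).toNat + 1 := by omega
      rw [bindigitLoop, if_neg h, ih _ _ _ hlt (by omega), hk, shift_step]

theorem bindigitLoop_miss (fuel : Nat) : ∀ (n cp rp : Int), (rp < cp ∨ cp + fuel ≤ rp) →
    bindigitLoop n cp rp fuel = -1 := by
  induction fuel with
  | zero => intro n cp rp _; rfl
  | succ f ih =>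
    intro n cp rp h
    rw [bindigitLoop, if_neg (by omega), ih _ _ _ (by omega)]

-- ===== VERDICT (by name: the statement is the Claim_ definition above) =====
theorem bindigit_spec : Claim_equal_bindigit := by
  intro n p bits _
  unfold Spec_bindigit bindigit bindigit_alt
  by_cases h : 0 ≤ bits - p - 1 ∧ bits - p - 1 < 27
  · rw [if_pos h, bindigitLoop_hit 27 n 0 _ (by omega) (by omega)]
    norm_num
  · rw [if_neg h, bindigitLoop_miss 27 n 0 _ (by omega)]
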